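-- pv_equiv track=rewrite | github.com/freeloop001/freeloop001.github.io | examples/rag-stage3/01-embedding/chunk_strategies.py | recursive_chunk
-- ===== SOURCE A (Python) =====
-- def recursive_chunk(text: str, delimiters=None, min_length=50):
--     """递归分块"""
--     if delimiters is None:
--         delimiters = ["\n\n", "\n", ". ", " "]
--
--     if not delimiters:
--         return [text] if len(text) >= min_length else []
--
--     delimiter = delimiters[0]
--     parts = text.split(delimiter)
--
--     if len(parts) > 1:
--         result = []
--         for part in parts:
--             result.extend(recursive_chunk(part, delimiters[1:], min_length))
--         return result
--     else:
--         return recursive_chunk(text, delimiters[1:], min_length)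
-- ===== SOURCE B (Python) =====
-- def recursive_chunk(text, delimiters=None, min_length=50):
--     """Iterative reformulation: one pass per delimiter over a flat segment list."""
--     if delimiters is None:
--         delimiters = ["\n\n", "\n", ". ", " "]
--     segments = [text]
--     for d in delimiters:
--         segments = [p for s in segments for p in s.split(d)]
--     return [s for s in segments if len(s) >= min_length]
-- ===== Notes on version B (the rewrite author's own statement) =====
-- stated objective: simpler
-- what changed: Replaced A's branching recursion over the delimiter list (a Python call and a delimiters[1:] copy per segment, plus an extend loop) by an iterative fold: start from [text], re-split the flat segment list once per delimiter with a comprehension, then apply the min_length filter in one final pass.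
import Mathlib
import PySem

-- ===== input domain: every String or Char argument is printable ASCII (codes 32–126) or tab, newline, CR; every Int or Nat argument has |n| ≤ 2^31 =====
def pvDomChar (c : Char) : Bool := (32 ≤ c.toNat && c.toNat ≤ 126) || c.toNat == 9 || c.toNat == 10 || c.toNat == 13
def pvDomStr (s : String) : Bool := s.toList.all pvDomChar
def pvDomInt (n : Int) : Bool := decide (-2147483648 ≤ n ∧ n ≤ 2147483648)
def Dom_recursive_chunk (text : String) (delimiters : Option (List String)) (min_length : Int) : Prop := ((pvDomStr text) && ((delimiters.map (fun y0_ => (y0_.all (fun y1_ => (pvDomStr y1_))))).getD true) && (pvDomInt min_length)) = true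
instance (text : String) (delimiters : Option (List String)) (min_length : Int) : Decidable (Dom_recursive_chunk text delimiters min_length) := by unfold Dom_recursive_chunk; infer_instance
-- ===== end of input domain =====

-- B replaces A's recursion on the delimiter list by an iterative per-delimiter re-splitting of a
-- flat segment list followed by a single final length filter (objective: simpler).
-- On inputs excluded by Pre_ (an empty-string delimiter) both Pythons raise ValueError.

-- ===== PORT A =====
-- recursion on the delimiter list; 'text.split(d)' is PySem.Str.split?, whose 'none' case
-- (d = "", Python ValueError) is excluded by Pre_ and ported as returning [].
def recursive_chunk_go (min_length : Int) : List String → String → List String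
  | [], text => if PySem.Str.len text ≥ min_length then [text] else []
  | d :: rest, text =>
    match PySem.Str.split? text d with
    | none => []   -- Python raises ValueError here; outside Pre_
    | some parts =>
      if parts.length > 1 then
        parts.foldl (fun acc part => acc ++ recursive_chunk_go min_length rest part) []
      else
        recursive_chunk_go min_length rest text

def recursive_chunk (text : String) (delimiters : Option (List String)) (min_length : Int) : List String :=
  let ds := delimiters.getD ["\n\n", "\n", ". ", " "]
  recursive_chunk_go min_length ds text

-- ===== PORT B =====
-- iterative: fold over delimiters, re-splitting every segment ('[p for s in segments for p in s.split(d)]'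
-- is a flatMap; the 'none' case of split?, d = "", is outside Pre_ and ported as []).
def recursive_chunk_alt (text : String) (delimiters : Option (List String)) (min_length : Int) : List String :=
  let ds := delimiters.getD ["\n\n", "\n", ". ", " "]
  let segments := ds.foldl (fun segs d => segs.flatMap (fun s => (PySem.Str.split? s d).getD [])) [text]
  segments.filter (fun s => decide (PySem.Str.len s ≥ min_length))

-- ===== PRECONDITION & SPEC =====
-- Pre_ excludes exactly the inputs on which Python's text.split(delimiter) raises ValueError:
-- an explicitly given delimiter list containing the empty string (both A and B raise there).
def Pre_recursive_chunk (_text : String) (delimiters : Option (List String)) (_min_length : Int) : Prop :=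
  "" ∉ delimiters.getD []

instance (text : String) (delimiters : Option (List String)) (min_length : Int) : Decidable (Pre_recursive_chunk text delimiters min_length) := by unfold Pre_recursive_chunk; infer_instance

def pvWitness_recursive_chunk : String × Option (List String) × Int := ("ab cd ef", some [" "], 2)

def Spec_recursive_chunk (text : String) (delimiters : Option (List String)) (min_length : Int) (out : List String) : Prop := out = recursive_chunk_alt text delimiters min_length
instance (text : String) (delimiters : Option (List String)) (min_length : Int) (out : List String) : Decidable (Spec_recursive_chunk text delimiters min_length out) := by unfold Spec_recursive_chunk; infer_instance

-- ===== CLAIM (what is proved, stated in full; the proofs are below) =====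
def Claim_equal_recursive_chunk : Prop := ∀ (text : String) (delimiters : Option (List String)) (min_length : Int), Dom_recursive_chunk text delimiters min_length → Pre_recursive_chunk text delimiters min_length → Spec_recursive_chunk text delimiters min_length (recursive_chunk text delimiters min_length)

-- ===== LEMMAS AND PROOFS =====

-- splitOn.go on a nonempty separator: either no cut happened (the result is acc.reverse ++ [one piece])
-- or the result is strictly longer than acc.length + 1.
theorem go_spec (sep : List Char) :
    ∀ (fuel : Nat) (l cur : List Char) (acc : List (List Char)),
      PySem.Chars.splitOn.go sep fuel l cur acc = acc.reverse ++ [cur.reverse ++ l] ∨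
      (PySem.Chars.splitOn.go sep fuel l cur acc).length > acc.length + 1 := by
  intro fuel
  induction fuel with
  | zero =>
    intro l cur acc
    left
    simp [PySem.Chars.splitOn.go]
  | succ fuel ih =>
    intro l cur acc
    match l with
    | [] =>
      left
      simp [PySem.Chars.splitOn.go]
    | c :: rest =>
      rw [PySem.Chars.splitOn.go]
      by_cases hp : sep.isPrefixOf (c :: rest) = true
      · simp only [hp, if_true]
        right
        rcases ih (List.drop sep.length (c :: rest)) [] (cur.reverse :: acc) with h | h
        · rw [h]; simp
        · simp at h ⊢; omega
      · simp only [hp]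
        rcases ih rest (c :: cur) acc with h | h
        · left; rw [h]; simp
        · right; exact h
      
theorem splitOn_short (s sep : List Char)
    (h : (PySem.Chars.splitOn s sep).length ≤ 1) : PySem.Chars.splitOn s sep = [s] := by
  unfold PySem.Chars.splitOn
  rcases go_spec sep (s.length + 1) s [] [] with h2 | h2
  · simpa using h2
  · exfalso
    unfold PySem.Chars.splitOn at h
    simp at h2
    omega

-- String-level split as both ports use it ('none' replaced by [], unreachable for d ≠ "").
theorem split_short (s d : String) (hd : d ≠ "")
    (h : ((PySem.Str.split? s d).getD []).length ≤ 1) : (PySem.Str.split? s d).getD [] = [s] := by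
  have hne : d.toList ≠ [] := fun hc => hd (String.toList_inj.mp (by simpa using hc))
  simp only [PySem.Str.split?, PySem.Chars.split?, List.isEmpty_iff, hne, if_false, Option.map_some, Option.getD_some] at h ⊢
  rw [splitOn_short s.toList d.toList (by simpa using h)]
  simp

-- one step of A equals splitting and flat-mapping the recursion
theorem go_step (m : Int) (d : String) (rest : List String) (text : String) (hd : d ≠ "") :
    recursive_chunk_go m (d :: rest) text =
      ((PySem.Str.split? text d).getD []).flatMap (fun p => recursive_chunk_go m rest p) := by
  have hne : d.toList ≠ [] := fun hc => hd (String.toList_inj.mp (by simpa using hc))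
  rw [recursive_chunk_go]
  have hsome : PySem.Str.split? text d = some (((PySem.Chars.splitOn text.toList d.toList)).map String.ofList) := by
    simp [PySem.Str.split?, PySem.Chars.split?, hne]
  rw [hsome]
  simp only [Option.getD_some]
  by_cases hlen : ((PySem.Chars.splitOn text.toList d.toList).map String.ofList).length > 1
  · simp only [hlen, if_true]
    rw [PySem.List.foldl_append_eq_flatMap]
    simp
  · simp only [hlen, if_false]
    have := split_short text d hd (by
      rw [hsome]; simpa using Nat.le_of_not_lt hlen)
    rw [hsome] at this
    simp only [Option.getD_some] at this
    rw [this]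
    simp

theorem flatMap_filter {m : Int} (segs : List String) :
    segs.flatMap (fun s => if PySem.Str.len s ≥ m then [s] else []) =
      segs.filter (fun s => decide (PySem.Str.len s ≥ m)) := by
  induction segs with
  | nil => rfl
  | cons s rest ih =>
    simp only [List.flatMap_cons, List.filter_cons, ih]
    by_cases h : m ≤ (s.length : Int) <;> simp [h, PySem.Str.len_eq]

theorem main_lemma (m : Int) :
    ∀ (ds : List String), "" ∉ ds → ∀ (segs : List String),
      segs.flatMap (fun s => recursive_chunk_go m ds s) =
        (ds.foldl (fun segs d => segs.flatMap (fun s => (PySem.Str.split? s d).getD [])) segs).filter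
          (fun s => decide (PySem.Str.len s ≥ m)) := by
  intro ds
  induction ds with
  | nil =>
    intro _ segs
    simp only [List.foldl_nil]
    exact flatMap_filter segs
  | cons d rest ih =>
    intro hmem segs
    have hd : d ≠ "" := fun hc => hmem (by simp [hc])
    have hrest : "" ∉ rest := fun hc => hmem (by simp [hc])
    simp only [List.foldl_cons]
    rw [← ih hrest]
    have : segs.flatMap (fun s => recursive_chunk_go m (d :: rest) s)
        = segs.flatMap (fun s => ((PySem.Str.split? s d).getD []).flatMap (fun p => recursive_chunk_go m rest p)) := by
      apply List.flatMap_congr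
      intro s _
      exact go_step m d rest s hd
    rw [this, ← List.flatMap_assoc]

-- ===== VERDICT (by name: the statement is the Claim_ definition above) =====
theorem recursive_chunk_spec : Claim_equal_recursive_chunk := by
  intro text delimiters min_length _ hpre
  unfold Spec_recursive_chunk recursive_chunk recursive_chunk_alt
  have hds : "" ∉ delimiters.getD ["\n\n", "\n", ". ", " "] := by
    cases delimiters with
    | none => decide
    | some ds => exact hpre
  have := main_lemma min_length (delimiters.getD ["\n\n", "\n", ". ", " "]) hds [text]
  simpa using this
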